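-- pv_equiv track=rewrite | github.com/ruirui688/SLAM | tools/run_minimal_demo.py | canonical_label
-- ===== SOURCE A (Python) =====
-- from collections import Counter, defaultdict
--
-- def canonical_label(labels: list[str]) -> str:
--     if not labels:
--         return "unknown"
--     normalized = [label.strip().lower() for label in labels]
--     aliases = {
--         "barrier": "safety barrier",
--         "storage rack": "warehouse rack",
--         "pallet": "pallet stack",
--     }
--     mapped = [aliases.get(label, label) for label in normalized]
--     return Counter(mapped).most_common(1)[0][0]
-- ===== SOURCE B (Python) =====
-- def canonical_label(labels: list[str]) -> str:
--     if not labels: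
--         return "unknown"
--     aliases = {
--         "barrier": "safety barrier",
--         "storage rack": "warehouse rack",
--         "pallet": "pallet stack",
--     }
--     keys = []
--     for label in labels:
--         k = label.strip().lower()
--         keys.append(aliases.get(k, k))
--     return _most_common(keys)[0]
--
-- def _most_common(keys):
--     # keys nonempty; returns (label, count) by partition-and-recurse:
--     # count the head label, strip all its occurrences, recurse on the rest;
--     # strict '>' lets the earlier (head) label win ties, matching first-seen order.
--     k = keys[0]
--     c = keys.count(k)
--     rest = [x for x in keys[1:] if x != k]
--     if not rest:
--         return (k, c)
--     b, bc = _most_common(rest)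
--     return (b, bc) if bc > c else (k, c)
-- ===== Notes on version B (the rewrite author's own statement) =====
-- stated objective: alternative
-- what changed: Replaces Counter + most_common by a recursive partition-and-remove selection: count the first label, filter out all its occurrences, recurse on the remainder, and keep the earlier label unless the remainder's best count is strictly greater (first-seen tie-break preserved by the strict comparison).
import Mathlib
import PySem

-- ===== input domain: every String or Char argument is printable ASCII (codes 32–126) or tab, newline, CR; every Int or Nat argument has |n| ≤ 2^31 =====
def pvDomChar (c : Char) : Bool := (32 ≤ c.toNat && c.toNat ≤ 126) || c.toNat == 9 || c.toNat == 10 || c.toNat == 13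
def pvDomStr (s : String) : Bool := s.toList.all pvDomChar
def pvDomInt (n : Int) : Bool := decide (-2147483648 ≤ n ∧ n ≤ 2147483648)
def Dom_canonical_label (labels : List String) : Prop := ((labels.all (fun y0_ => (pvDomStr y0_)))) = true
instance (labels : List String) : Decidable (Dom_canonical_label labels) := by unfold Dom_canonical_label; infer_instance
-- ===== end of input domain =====

-- B replaces Counter + most_common by a recursive partition: count the head label,
-- remove all its occurrences, recurse on the remainder, and keep the earlier label
-- unless the remainder's best count is strictly greater (alternative decomposition).


-- ===== PORT A =====
-- the literal alias dict of A
def pvAliasesA : PySem.Dict String String := PySem.Dict.ofList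
  [("barrier", "safety barrier"), ("storage rack", "warehouse rack"), ("pallet", "pallet stack")]

def canonical_label (labels : List String) : String :=
  if labels = [] then "unknown"
  else
    let normalized := labels.map (fun label => PySem.Str.lower (PySem.Str.strip label))
    let mapped := normalized.map (fun label => pvAliasesA.getD label label)
    -- Counter(mapped).most_common(1)[0][0]: CPython's most_common(1) is [max(items, key=itemgetter(1))]
    -- (heapq.nlargest special-cases n = 1), i.e. the FIRST item with maximal count = PySem.List.max?.
    -- 'mapped' is nonempty here, so the getD default (Python's IndexError on []) is unreachable.
    ((PySem.List.max? (PySem.Dict.counter mapped).items (fun p => p.2)).getD ("unknown", 0)).1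

-- ===== PORT B =====
-- B-side helpers: the alias dict and the per-label normalize+alias step of Source B's loop body
def pvAliasesB : PySem.Dict String String := PySem.Dict.ofList
  [("barrier", "safety barrier"), ("storage rack", "warehouse rack"), ("pallet", "pallet stack")]

def pvKeyB (label : String) : String :=
  let k := PySem.Str.lower (PySem.Str.strip label)
  pvAliasesB.getD k k

-- Source B's _most_common: recursive partition on a nonempty list; the [] case is
-- unreachable in B (Python's _most_common is only called on nonempty lists).
def pvMostCommon : List String → String × Int
  | [] => ("unknown", 0)
  | k :: t =>
    let c : Int := (PySem.List.count (k :: t) k : Int)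
    let rest := t.filter (fun x => x != k)
    if rest = [] then (k, c)
    else
      let p := pvMostCommon rest
      if p.2 > c then p else (k, c)
termination_by keys => keys.length
decreasing_by
  simp only [List.length_cons, List.length_unattach]
  exact Nat.lt_succ_of_le (le_trans (List.length_filter_le _ _) (by simp))

def canonical_label_alt (labels : List String) : String :=
  if labels = [] then "unknown"
  else (pvMostCommon (labels.map pvKeyB)).1

-- ===== PRECONDITION & SPEC =====
def Spec_canonical_label (labels : List String) (out : String) : Prop := out = canonical_label_alt labels
instance (labels : List String) (out : String) : Decidable (Spec_canonical_label labels out) := by unfold Spec_canonical_label; infer_instance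

-- ===== CLAIM (what is proved, stated in full; the proofs are below) =====
def Claim_equal_canonical_label : Prop := ∀ (labels : List String), Dom_canonical_label labels → Spec_canonical_label labels (canonical_label labels)

-- ===== LEMMAS AND PROOFS =====

-- the left-biased argmax selection A's max? performs
def pvSel (a b : String × Int) : String × Int := if a.2 < b.2 then b else a

-- PySem.List.max? on a nonempty list is the argmax fold seeded with the head.
theorem pv_max?_cons : ∀ (t : List (String × Int)) (x : String × Int),
    PySem.List.max? (x :: t) (fun p => p.2) = some (t.foldl pvSel x) := by
  intro t
  induction t with
  | nil => intro x; rfl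
  | cons y t ih =>
    intro x
    have h1 : PySem.List.max? (x :: y :: t) (fun p : String × Int => p.2)
        = PySem.List.max? ((if x.2 < y.2 then y else x) :: t) (fun p => p.2) := by
      by_cases h : x.2 < y.2 <;> simp [PySem.List.max?, h]
    rw [h1, ih]
    by_cases h : x.2 < y.2 <;> simp [pvSel, h]

theorem pvSel_assoc (a b c : String × Int) : pvSel (pvSel a b) c = pvSel a (pvSel b c) := by
  unfold pvSel
  split_ifs <;> first | rfl | omega

theorem pv_foldl_sel : ∀ (l : List (String × Int)) (a b : String × Int),
    l.foldl pvSel (pvSel a b) = pvSel a (l.foldl pvSel b) := by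
  intro l
  induction l with
  | nil => intro a b; rfl
  | cons y l ih =>
    intro a b
    simp only [List.foldl_cons, pvSel_assoc, ih]

-- Set.ofList over an accumulator already containing k ignores all k's
theorem pv_foldl_add_filter : ∀ (t : List String) (s : PySem.Set String) (k : String),
    k ∈ s → t.foldl PySem.Set.add s = (t.filter (fun x => x != k)).foldl PySem.Set.add s := by
  intro t
  induction t with
  | nil => intro s k _; rfl
  | cons x t ih =>
    intro s k hk
    by_cases hx : x = k
    · subst hx
      have hadd : PySem.Set.add s x = s := by
        simp [PySem.Set.add, PySem.Set.contains, hk]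
      have hfil : List.filter (fun y => y != x) (x :: t) = List.filter (fun y => y != x) t := by
        simp
      rw [List.foldl_cons, hadd, hfil]
      exact ih s x hk
    · have hne : (x != k) = true := by simp [bne, hx]
      simp only [List.filter_cons, hne, if_pos, List.foldl_cons]
      apply ih
      have hsub : s ⊆ PySem.Set.add s x := by
        intro z hz
        simp [PySem.Set.add]
        split
        · exact hz
        · exact List.mem_append_left _ hz
      exact hsub hk

-- an element absent from the rest of the input can be peeled off the accumulator
theorem pv_foldl_add_cons : ∀ (l : List String) (s : PySem.Set String) (a : String),
    a ∉ l → l.foldl PySem.Set.add (a :: s) = a :: l.foldl PySem.Set.add s := by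
  intro l
  induction l with
  | nil => intro s a _; rfl
  | cons x l ih =>
    intro s a ha
    have hxa : x ≠ a := fun h => ha (h ▸ List.mem_cons_self)
    have hal : a ∉ l := fun h => ha (List.mem_cons_of_mem _ h)
    simp only [List.foldl_cons]
    have : PySem.Set.add (a :: s) x = a :: PySem.Set.add s x := by
      simp [PySem.Set.add, PySem.Set.contains, hxa]
      split <;> simp
    rw [this, ih _ _ hal]

-- first-occurrence dedup: set(k :: t) = k :: set(t with k removed)
theorem pv_ofList_cons (k : String) (t : List String) :
    PySem.Set.ofList (k :: t) = k :: PySem.Set.ofList (t.filter (fun x => x != k)) := by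
  have h1 : PySem.Set.ofList (k :: t) = t.foldl PySem.Set.add [k] := by
    rw [PySem.Set.ofList_eq_foldl]; rfl
  rw [h1, pv_foldl_add_filter t [k] k (by simp)]
  have hk : k ∉ t.filter (fun x => x != k) := by
    intro h
    have := List.of_mem_filter h
    simp at this
  rw [pv_foldl_add_cons _ _ _ hk, PySem.Set.ofList_eq_foldl]

-- counts of surviving labels are unchanged by removing the head label
theorem pv_count_filter (t : List String) (k x : String) (hx : x ≠ k) :
    (k :: t).count x = (t.filter (fun y => y != k)).count x := by
  rw [List.count_cons_of_ne (Ne.symm hx), List.count_filter]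
  simp [bne, hx]

-- Counter's item list decomposes along B's partition
theorem pv_items_cons (k : String) (t : List String) :
    (PySem.Dict.counter (k :: t)).items
      = (k, ((k :: t).count k : Int)) :: (PySem.Dict.counter (t.filter (fun x => x != k))).items := by
  rw [PySem.Dict.items_counter, PySem.Dict.items_counter, pv_ofList_cons]
  simp only [List.map_cons, List.cons.injEq, true_and]
  apply List.map_congr_left
  intro x hxm
  have hx : x ∈ t.filter (fun y => y != k) := (PySem.Set.mem_ofList _ _).mp hxm
  have hxk : x ≠ k := by
    have := List.of_mem_filter hx
    simpa [bne] using this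
  rw [pv_count_filter t k x hxk]

-- main lemma: A's first-maximum over Counter items is B's recursion
theorem pv_mc_eq : ∀ (n : Nat) (keys : List String), keys.length ≤ n → keys ≠ [] →
    PySem.List.max? (PySem.Dict.counter keys).items (fun p => p.2) = some (pvMostCommon keys) := by
  intro n
  induction n with
  | zero =>
    intro keys hlen hne
    cases keys with
    | nil => exact absurd rfl hne
    | cons k t => simp at hlen
  | succ n ih =>
    intro keys hlen hne
    cases keys with
    | nil => exact absurd rfl hne
    | cons k t =>
      rw [pv_items_cons]
      by_cases hrest : t.filter (fun x => x != k) = []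
      · rw [hrest]
        have hc0 : (PySem.Dict.counter ([] : List String)).items = [] := rfl
        rw [hc0, pv_max?_cons]
        simp only [List.foldl_nil]
        rw [pvMostCommon]
        simp [hrest, PySem.List.count]
      · have hlen' : (t.filter (fun x => x != k)).length ≤ n := by
          have h1 := List.length_filter_le (fun x => x != k) t
          simp only [List.length_cons] at hlen
          omega
        have hIH := ih _ hlen' hrest
        -- rest items are nonempty
        obtain ⟨y, l', hyl⟩ : ∃ y l', (PySem.Dict.counter (t.filter (fun x => x != k))).items = y :: l' := by
          rcases List.exists_mem_of_ne_nil _ hrest with ⟨z, hz⟩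
          have hz' : z ∈ PySem.Set.ofList (t.filter (fun x => x != k)) := (PySem.Set.mem_ofList _ _).mpr hz
          have : (z, (((t.filter (fun x => x != k)).count z : Int))) ∈
              (PySem.Dict.counter (t.filter (fun x => x != k))).items := by
            rw [PySem.Dict.items_counter]
            exact List.mem_map.mpr ⟨z, hz', rfl⟩
          cases h : (PySem.Dict.counter (t.filter (fun x => x != k))).items with
          | nil => rw [h] at this; exact absurd this (List.not_mem_nil)
          | cons y l' => exact ⟨y, l', rfl⟩
        rw [hyl] at hIH ⊢
        rw [pv_max?_cons] at hIH ⊢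
        have hfold : l'.foldl pvSel y = pvMostCommon (t.filter (fun x => x != k)) :=
          Option.some.inj hIH
        have : l'.foldl pvSel (pvSel (k, ((k :: t).count k : Int)) y)
            = pvSel (k, ((k :: t).count k : Int)) (l'.foldl pvSel y) := pv_foldl_sel l' _ y
        simp only [List.foldl_cons]
        rw [this, hfold]
        rw [pvMostCommon]
        simp only [if_neg hrest]
        unfold pvSel
        have : PySem.List.count (k :: t) k = (k :: t).count k := by
          simp [PySem.List.count]
        rw [this]

-- ===== VERDICT (by name: the statement is the Claim_ definition above) =====
theorem canonical_label_spec : Claim_equal_canonical_label := by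
  intro labels _
  unfold Spec_canonical_label canonical_label canonical_label_alt
  by_cases h : labels = []
  · simp [h]
  · simp only [if_neg h]
    have hfun : ((fun label => pvAliasesA.getD label label) ∘
        (fun label => PySem.Str.lower (PySem.Str.strip label))) = pvKeyB := by
      funext label
      simp only [Function.comp, pvKeyB, pvAliasesA, pvAliasesB]
    rw [List.map_map, hfun]
    have hne : labels.map pvKeyB ≠ [] := by simpa using h
    rw [pv_mc_eq (labels.map pvKeyB).length _ le_rfl hne]
    rfl
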